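-- pv_equiv track=rewrite | github.com/sjsawyer/aoc-2023 | q02/q02.py | part1
-- ===== SOURCE A (Python) =====
-- def part1(games):
--     amounts = {"red": 12, "green": 13, "blue": 14}
--     total = 0
--     for i, game in enumerate(games, start=1):
--         possible = True
--         for turn in game:
--             for color in amounts:
--                 if turn.get(color, 0) > amounts[color]:
--                     possible = False
--         if possible:
--             total += i
--     return total
-- ===== SOURCE B (Python) =====
-- def part1(games):
--     limits = {"red": 12, "green": 13, "blue": 14}
--     # columnar: one staged pass per color over a vector of per-game flags
--     ok = [True] * len(games)
--     for color, limit in limits.items():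
--         ok = [good and all(turn.get(color, 0) <= limit for turn in game)
--               for good, game in zip(ok, games)]
--     return sum(i + 1 for i, good in enumerate(ok) if good)
-- ===== Notes on version B (the rewrite author's own statement) =====
-- stated objective: alternative
-- what changed: B works color-major in staged passes: it keeps a vector of per-game flags (one boolean per game) and, for each of the three colors, rebuilds the whole vector by zipping it with the games, then sums the surviving 1-based indices; A makes a single game-major scan with a nested color loop and a mutable 'possible' flag per game.
import Mathlib
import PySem

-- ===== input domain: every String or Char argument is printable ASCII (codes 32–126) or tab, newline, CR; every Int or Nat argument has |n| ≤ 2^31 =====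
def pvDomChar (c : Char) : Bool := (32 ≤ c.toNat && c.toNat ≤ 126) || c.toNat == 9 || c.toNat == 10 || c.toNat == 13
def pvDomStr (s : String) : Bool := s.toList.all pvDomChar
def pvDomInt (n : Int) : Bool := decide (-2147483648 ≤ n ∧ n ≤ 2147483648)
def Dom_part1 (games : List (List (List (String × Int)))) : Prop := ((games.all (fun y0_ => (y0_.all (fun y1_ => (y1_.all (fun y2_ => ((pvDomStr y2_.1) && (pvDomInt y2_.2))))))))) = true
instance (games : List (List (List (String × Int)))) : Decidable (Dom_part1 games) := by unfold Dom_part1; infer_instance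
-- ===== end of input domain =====

-- B is a color-major, staged-pass reformulation (a flag vector rebuilt once per color); objective: alternative, same cost.

-- turn.get(color, 0): first match in the association list, default 0 (shared dict-lookup helper)
def getD0 (turn : List (String × Int)) (c : String) : Int :=
  ((turn.find? (fun p => p.1 == c)).map (·.2)).getD 0

-- ===== PORT A =====
def part1 (games : List (List (List (String × Int)))) : Int :=
  let amounts : List (String × Int) := [("red", 12), ("green", 13), ("blue", 14)]
  (PySem.List.enumerate games 1).foldl
    (fun total ig =>
      let possible := ig.2.foldl
        (fun possible turn =>
          -- for color in amounts: amounts[color] = cl.2 (keys of the literal dict are distinct)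
          amounts.foldl
            (fun possible cl => if getD0 turn cl.1 > cl.2 then false else possible)
            possible)
        true
      if possible then total + ig.1 else total)
    0

-- ===== PORT B =====
-- one staged pass for one color: rebuild the flag vector from zip(ok, games)
def colPass (games : List (List (List (String × Int)))) (ok : List Bool)
    (c : String) (limit : Int) : List Bool :=
  (ok.zip games).map (fun p => p.1 && p.2.all (fun turn => decide (getD0 turn c ≤ limit)))

def part1_alt (games : List (List (List (String × Int)))) : Int :=
  let limits : List (String × Int) := [("red", 12), ("green", 13), ("blue", 14)]
  let ok := limits.foldl (fun ok cl => colPass games ok cl.1 cl.2)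
              (List.replicate games.length true)
  (PySem.List.enumerate ok 0).foldl
    (fun s p => if p.2 then s + (p.1 + 1) else s) 0

-- ===== PRECONDITION & SPEC =====
def Spec_part1 (games : List (List (List (String × Int)))) (out : Int) : Prop := out = part1_alt games
instance (games : List (List (List (String × Int)))) (out : Int) : Decidable (Spec_part1 games out) := by unfold Spec_part1; infer_instance

-- ===== CLAIM (what is proved, stated in full; the proofs are below) =====
def Claim_equal_part1 : Prop := ∀ (games : List (List (List (String × Int)))), Dom_part1 games → Spec_part1 games (part1 games)

-- ===== LEMMAS AND PROOFS =====

def okTurn (t : List (String × Int)) : Bool :=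
  decide (getD0 t "red" ≤ 12) && decide (getD0 t "green" ≤ 13) && decide (getD0 t "blue" ≤ 14)

def okGame (g : List (List (String × Int))) : Bool := g.all okTurn

theorem foldl_and_eq_all (f : List (String × Int) → Bool) (xs : List (List (String × Int))) (b : Bool) :
    xs.foldl (fun p t => p && f t) b = (b && xs.all f) := by
  induction xs generalizing b with
  | nil => simp
  | cons x xs ih => simp [List.foldl, ih, Bool.and_assoc]

theorem inner_step (turn : List (String × Int)) (p : Bool) :
    [("red", (12 : Int)), ("green", 13), ("blue", 14)].foldl
      (fun possible cl => if getD0 turn cl.1 > cl.2 then false else possible) p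
      = (p && okTurn turn) := by
  cases p with
  | false =>
    simp only [List.foldl, Bool.false_and]
    split_ifs <;> rfl
  | true =>
    simp only [List.foldl, okTurn, Bool.true_and]
    split_ifs <;> simp_all

theorem foldl_congr' {α β : Type} (f g : β → α → β) (xs : List α) (b : β)
    (h : ∀ b a, f b a = g b a) : xs.foldl f b = xs.foldl g b := by
  induction xs generalizing b with
  | nil => rfl
  | cons x xs ih => simp only [List.foldl, h, ih]

theorem possibleA_eq_all (game : List (List (String × Int))) :
    game.foldl
      (fun possible turn =>
        [("red", (12 : Int)), ("green", 13), ("blue", 14)].foldl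
          (fun possible cl => if getD0 turn cl.1 > cl.2 then false else possible)
          possible)
      true = okGame game := by
  have h := foldl_and_eq_all okTurn game true
  simp only [Bool.true_and] at h
  rw [okGame, ← h]
  exact foldl_congr' _ _ game true (fun p t => inner_step t p)

-- a staged pass applied to a vector of the form games.map h
theorem colPass_map (games : List (List (List (String × Int)))) (h : List (List (String × Int)) → Bool)
    (c : String) (L : Int) :
    colPass games (games.map h) c L
      = games.map (fun g => h g && g.all (fun turn => decide (getD0 turn c ≤ L))) := by
  induction games with
  | nil => rfl
  | cons g gs ih => simp [colPass, List.zip] at ih ⊢; exact ih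

theorem ok_final (games : List (List (List (String × Int)))) :
    [("red", (12 : Int)), ("green", 13), ("blue", 14)].foldl
      (fun ok cl => colPass games ok cl.1 cl.2) (List.replicate games.length true)
      = games.map okGame := by
  have h0 : List.replicate games.length true = games.map (fun _ => true) := by
    simp
  simp only [List.foldl, h0, colPass_map]
  apply List.map_congr_left
  intro g _
  rw [Bool.eq_iff_iff]
  simp only [okGame, okTurn, Bool.true_and, List.all_eq_true, Bool.and_eq_true,
    decide_eq_true_eq]
  constructor
  · rintro ⟨⟨h1, h2⟩, h3⟩ t ht
    exact ⟨⟨h1 t ht, h2 t ht⟩, h3 t ht⟩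
  · intro h
    exact ⟨⟨fun t ht => (h t ht).1.1, fun t ht => (h t ht).1.2⟩, fun t ht => (h t ht).2⟩

-- A's game-major summation equals B's flag-vector summation, off by the start index
theorem sum_shift (games : List (List (List (String × Int)))) (k s : Int) :
    (PySem.List.enumerate games (k + 1)).foldl
      (fun total ig => if okGame ig.2 then total + ig.1 else total) s
      = (PySem.List.enumerate (games.map okGame) k).foldl
          (fun s p => if p.2 then s + (p.1 + 1) else s) s := by
  induction games generalizing k s with
  | nil => rfl
  | cons g gs ih =>
    simp only [List.map, PySem.List.enumerate_cons, List.foldl]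
    rw [show k + 1 + 1 = (k + 1) + 1 from rfl, ih (k + 1)]

theorem partA_eq (games : List (List (List (String × Int)))) :
    part1 games = (PySem.List.enumerate games 1).foldl
      (fun total ig => if okGame ig.2 then total + ig.1 else total) 0 := by
  unfold part1
  exact foldl_congr' _ _ _ 0 (fun total ig => by rw [possibleA_eq_all ig.2])

theorem partB_eq (games : List (List (List (String × Int)))) :
    part1_alt games = (PySem.List.enumerate (games.map okGame) 0).foldl
      (fun s p => if p.2 then s + (p.1 + 1) else s) 0 := by
  unfold part1_alt
  dsimp only
  rw [ok_final]

-- ===== VERDICT (by name: the statement is the Claim_ definition above) =====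
theorem part1_spec : Claim_equal_part1 := by
  intro games _
  unfold Spec_part1
  rw [partA_eq, partB_eq, ← sum_shift games 0 0]
  norm_num
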